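-- pv_equiv track=rewrite | github.com/papanokechi/wallis-pcf-lean4 | mutant_harvester.py | _detect_conductor
-- ===== SOURCE A (Python) =====
-- def _detect_conductor(beta):
--     """Detect conductor resonance from beta polynomial coefficients."""
--     if not beta:
--         return "N=?"
--     # Check for conductor-24 family (Kloosterman)
--     for c in beta:
--         if abs(c) in (24, 48, 72):
--             return f"N=24 (coeff {c})"
--     # Check for conductor-120 (5! = zeta5 territory)
--     for c in beta:
--         if abs(c) in (120, 60, 240):
--             return f"N=120 (coeff {c})"
--     # Leading coefficient analysis
--     lead = abs(beta[-1]) if beta else 0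
--     if lead > 0:
--         # Check if lead is a product of small primes
--         for n in [24, 120, 720, 48, 12, 6]:
--             if lead % n == 0:
--                 return f"N={n} (lead={lead})"
--     return "N=generic"
-- ===== SOURCE B (Python) =====
-- def _detect_conductor(beta):
--     """Detect conductor resonance from beta polynomial coefficients."""
--     if not beta:
--         return "N=?"
--     pending = None
--     for c in beta:
--         a = abs(c)
--         if a in (24, 48, 72):
--             return f"N=24 (coeff {c})"
--         if pending is None and a in (120, 60, 240):
--             pending = f"N=120 (coeff {c})"
--     if pending is not None:
--         return pending
--     lead = abs(beta[-1])
--     if lead > 0: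
--         n = next((n for n in (24, 120, 720, 48, 12, 6) if lead % n == 0), None)
--         if n is not None:
--             return f"N={n} (lead={lead})"
--     return "N=generic"
-- ===== Notes on version B (the rewrite author's own statement) =====
-- stated objective: alternative
-- what changed: The two sequential priority scans over beta are fused into one pass that returns immediately on a 24-family coefficient while deferring the first 120-family hit in an accumulator, and the leading-coefficient loop is replaced by a first-match search (next/find) over the divisor list.
import Mathlib
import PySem

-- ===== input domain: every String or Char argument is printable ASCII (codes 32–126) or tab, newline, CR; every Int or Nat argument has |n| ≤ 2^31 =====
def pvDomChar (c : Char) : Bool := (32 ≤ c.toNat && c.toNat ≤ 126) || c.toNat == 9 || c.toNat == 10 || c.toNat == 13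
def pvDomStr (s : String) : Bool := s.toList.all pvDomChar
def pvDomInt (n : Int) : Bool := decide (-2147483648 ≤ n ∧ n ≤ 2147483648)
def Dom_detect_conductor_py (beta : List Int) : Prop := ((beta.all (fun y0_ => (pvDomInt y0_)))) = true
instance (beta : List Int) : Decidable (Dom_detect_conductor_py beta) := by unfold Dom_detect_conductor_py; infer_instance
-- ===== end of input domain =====

-- B fuses A's two sequential priority scans into one pass (deferring the first 120-family
-- hit in an accumulator) and replaces the leading-coefficient loop by a first-match search.


-- ===== PORT A =====
-- Python abs on int
def pyAbs (c : Int) : Int := if c < 0 then -c else c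

-- first loop: return "N=24 (coeff c)" on the first coefficient with |c| in (24, 48, 72)
def dcA_loop24 : List Int → Option String
  | [] => none
  | c :: rest =>
    if pyAbs c = 24 ∨ pyAbs c = 48 ∨ pyAbs c = 72 then
      some ("N=24 (coeff " ++ PySem.Int.toStr c ++ ")")
    else dcA_loop24 rest

-- second loop: first coefficient with |c| in (120, 60, 240)
def dcA_loop120 : List Int → Option String
  | [] => none
  | c :: rest =>
    if pyAbs c = 120 ∨ pyAbs c = 60 ∨ pyAbs c = 240 then
      some ("N=120 (coeff " ++ PySem.Int.toStr c ++ ")")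
    else dcA_loop120 rest

-- leading coefficient loop over [24, 120, 720, 48, 12, 6]
def dcA_lead (lead : Int) : List Int → Option String
  | [] => none
  | n :: rest =>
    if PySem.Int.mod lead n = 0 then
      some ("N=" ++ PySem.Int.toStr n ++ " (lead=" ++ PySem.Int.toStr lead ++ ")")
    else dcA_lead lead rest

def detect_conductor_py (beta : List Int) : String :=
  if beta = [] then "N=?"
  else
    match dcA_loop24 beta with
    | some s => s
    | none =>
      match dcA_loop120 beta with
      | some s => s
      | none =>
        -- 'abs(beta[-1]) if beta else 0'; pyGet? cannot be none here since beta ≠ []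
        let lead := if beta = [] then 0 else pyAbs ((PySem.List.pyGet? beta (-1)).getD 0)
        if lead > 0 then
          match dcA_lead lead [24, 120, 720, 48, 12, 6] with
          | some s => s
          | none => "N=generic"
        else "N=generic"

-- ===== PORT B =====
-- single fused pass: Sum.inl = early return (24-family), Sum.inr = pending after the loop
def dcB_loop : List Int → Option String → String ⊕ Option String
  | [], pending => Sum.inr pending
  | c :: rest, pending =>
    let a := pyAbs c
    if a = 24 ∨ a = 48 ∨ a = 72 then
      Sum.inl ("N=24 (coeff " ++ PySem.Int.toStr c ++ ")")
    else
      dcB_loop rest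
        (match pending with
         | none => if a = 120 ∨ a = 60 ∨ a = 240 then some ("N=120 (coeff " ++ PySem.Int.toStr c ++ ")") else none
         | some s => some s)

def detect_conductor_py_alt (beta : List Int) : String :=
  if beta = [] then "N=?"
  else
    match dcB_loop beta none with
    | Sum.inl s => s
    | Sum.inr (some s) => s
    | Sum.inr none =>
      let lead := pyAbs ((PySem.List.pyGet? beta (-1)).getD 0)
      if lead > 0 then
        match [(24 : Int), 120, 720, 48, 12, 6].find? (fun n => PySem.Int.mod lead n == 0) with
        | some n => "N=" ++ PySem.Int.toStr n ++ " (lead=" ++ PySem.Int.toStr lead ++ ")"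
        | none => "N=generic"
      else "N=generic"

-- ===== PRECONDITION & SPEC =====
def Spec_detect_conductor_py (beta : List Int) (out : String) : Prop := out = detect_conductor_py_alt beta
instance (beta : List Int) (out : String) : Decidable (Spec_detect_conductor_py beta out) := by unfold Spec_detect_conductor_py; infer_instance

-- ===== CLAIM (what is proved, stated in full; the proofs are below) =====
def Claim_equal_detect_conductor_py : Prop := ∀ (beta : List Int), Dom_detect_conductor_py beta → Spec_detect_conductor_py beta (detect_conductor_py beta)

-- ===== LEMMAS AND PROOFS =====

-- the fused loop computes: early 24-result if any, else the stored pending (A's 120-scan)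
theorem dcB_loop_eq (l : List Int) (pending : Option String) :
    dcB_loop l pending =
      match dcA_loop24 l with
      | some s => Sum.inl s
      | none =>
        match pending with
        | some s => Sum.inr (some s)
        | none => Sum.inr (dcA_loop120 l) := by
  induction l generalizing pending with
  | nil => cases pending <;> simp [dcB_loop, dcA_loop24, dcA_loop120]
  | cons c rest ih =>
    simp only [dcB_loop, dcA_loop24, dcA_loop120]
    by_cases h24 : pyAbs c = 24 ∨ pyAbs c = 48 ∨ pyAbs c = 72
    · simp [h24]
    · simp only [h24, ite_false]
      cases pending with
      | some s => rw [ih]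
      | none =>
        by_cases h120 : pyAbs c = 120 ∨ pyAbs c = 60 ∨ pyAbs c = 240
        · rw [ih]; simp only [h120, if_pos]
        · simp only [h120, ite_false, ih]

-- A's hand-written lead loop is the formatted first match of B's find?
theorem dcA_lead_eq_find (lead : Int) (ns : List Int) :
    dcA_lead lead ns =
      (ns.find? (fun n => PySem.Int.mod lead n == 0)).map
        (fun n => "N=" ++ PySem.Int.toStr n ++ " (lead=" ++ PySem.Int.toStr lead ++ ")") := by
  induction ns with
  | nil => simp [dcA_lead]
  | cons n rest ih =>
    by_cases h : PySem.Int.mod lead n = 0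
    · simp [dcA_lead, h]
    · simp [dcA_lead, h, ih]

-- ===== VERDICT (by name: the statement is the Claim_ definition above) =====
theorem detect_conductor_py_spec : Claim_equal_detect_conductor_py := by
  intro beta _
  unfold Spec_detect_conductor_py detect_conductor_py detect_conductor_py_alt
  by_cases hb : beta = []
  · simp [hb]
  · simp only [hb, ite_false, dcB_loop_eq]
    cases h24 : dcA_loop24 beta with
    | some s => simp
    | none =>
      cases h120 : dcA_loop120 beta with
      | some s => simp
      | none =>
        simp only [dcA_lead_eq_find]
        cases [(24 : Int), 120, 720, 48, 12, 6].find? (fun n => PySem.Int.mod (pyAbs ((PySem.List.pyGet? beta (-1)).getD 0)) n == 0) <;>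
          simp
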